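-- pv_equiv track=rewrite | github.com/Olaaak/PodpisCyfrowy | ytscraper100.py | konwertuj_do_4_bitowych
-- ===== SOURCE A (Python) =====
-- def konwertuj_do_4_bitowych(liczby_bin):
--     liczby_4_bitowe = []
--     aktualna_liczba = 0
--
--     while len(liczby_bin) >= 4:############################################################################################### 4/8
--         aktualna_partia = liczby_bin[:4]###################################################################################### 4/8
--         aktualna_liczba = 0
--
--         for bit in aktualna_partia:
--             aktualna_liczba = (aktualna_liczba << 1) | bit
--
--         liczby_4_bitowe.append(aktualna_liczba)
--         liczby_bin = liczby_bin[4:]########################################################################################### 4/8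
--
--     return liczby_4_bitowe
-- ===== SOURCE B (Python) =====
-- def konwertuj_do_4_bitowych(liczby_bin):
--     wynik = []
--     aktualna_liczba = 0
--     licznik = 0
--     for bit in liczby_bin:
--         aktualna_liczba = (aktualna_liczba << 1) | bit
--         licznik += 1
--         if licznik == 4:
--             wynik.append(aktualna_liczba)
--             aktualna_liczba = 0
--             licznik = 0
--     return wynik
-- ===== Notes on version B (the rewrite author's own statement) =====
-- stated objective: faster
-- what changed: Replaces the while-loop that repeatedly slices off 4-element chunks (and an inner for over each slice) with a single flat pass keeping a running value and a bit counter, emitting a value each time the counter reaches 4; no slicing at all.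
import Mathlib
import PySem

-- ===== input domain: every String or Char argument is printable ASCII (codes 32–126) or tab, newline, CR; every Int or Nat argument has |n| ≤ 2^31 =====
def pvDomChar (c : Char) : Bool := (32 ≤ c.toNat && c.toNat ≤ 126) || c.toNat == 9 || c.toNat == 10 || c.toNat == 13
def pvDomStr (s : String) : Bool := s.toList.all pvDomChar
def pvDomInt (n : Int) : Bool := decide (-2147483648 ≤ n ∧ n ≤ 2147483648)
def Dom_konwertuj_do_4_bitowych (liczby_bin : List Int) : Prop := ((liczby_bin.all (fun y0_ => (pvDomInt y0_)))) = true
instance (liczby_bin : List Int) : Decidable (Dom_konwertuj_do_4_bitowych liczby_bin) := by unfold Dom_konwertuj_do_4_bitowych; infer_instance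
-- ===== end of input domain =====

-- B replaces A's repeated 4-element slicing with one flat pass over the bits
-- keeping a running value and a counter (objective: simpler; no slicing).


-- ===== PORT A =====
-- while len(liczby_bin) >= 4: take the first 4 bits, fold them with (<<1)|bit,
-- append, and continue on the tail liczby_bin[4:].
def konwertuj_do_4_bitowych_go (liczby_bin : List Int) (liczby_4_bitowe : List Int) : List Int :=
  if h : 4 ≤ liczby_bin.length then
    let aktualna_partia := liczby_bin.take 4          -- liczby_bin[:4]
    let aktualna_liczba := aktualna_partia.foldl (fun a bit => PySem.Int.bor (a <<< (1:Nat)) bit) (0:Int)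
    konwertuj_do_4_bitowych_go (liczby_bin.drop 4)    -- liczby_bin[4:]
      (liczby_4_bitowe ++ [aktualna_liczba])
  else liczby_4_bitowe
termination_by liczby_bin.length
decreasing_by simp [List.length_drop]; omega

def konwertuj_do_4_bitowych (liczby_bin : List Int) : List Int :=
  konwertuj_do_4_bitowych_go liczby_bin []

-- ===== PORT B =====
-- one flat pass; state = (wynik, aktualna_liczba, licznik)
def konwertuj_do_4_bitowych_alt_step (st : List Int × Int × Nat) (bit : Int) : List Int × Int × Nat :=
  let cur := PySem.Int.bor (st.2.1 <<< (1:Nat)) bit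
  if st.2.2 + 1 = 4 then (st.1 ++ [cur], 0, 0) else (st.1, cur, st.2.2 + 1)

def konwertuj_do_4_bitowych_alt (liczby_bin : List Int) : List Int :=
  (liczby_bin.foldl konwertuj_do_4_bitowych_alt_step ([], 0, 0)).1

-- ===== PRECONDITION & SPEC =====
def Spec_konwertuj_do_4_bitowych (liczby_bin : List Int) (out : List Int) : Prop := out = konwertuj_do_4_bitowych_alt liczby_bin
instance (liczby_bin : List Int) (out : List Int) : Decidable (Spec_konwertuj_do_4_bitowych liczby_bin out) := by unfold Spec_konwertuj_do_4_bitowych; infer_instance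

-- ===== CLAIM (what is proved, stated in full; the proofs are below) =====
def Claim_equal_konwertuj_do_4_bitowych : Prop := ∀ (liczby_bin : List Int), Dom_konwertuj_do_4_bitowych liczby_bin → Spec_konwertuj_do_4_bitowych liczby_bin (konwertuj_do_4_bitowych liczby_bin)

-- ===== LEMMAS AND PROOFS =====

-- B's fold consumes one full 4-group: the counter walks 0→1→2→3→emit.
theorem alt_foldl_four (a b c d : Int) (rest acc : List Int) :
    List.foldl konwertuj_do_4_bitowych_alt_step (acc, 0, 0) (a :: b :: c :: d :: rest)
      = List.foldl konwertuj_do_4_bitowych_alt_step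
          (acc ++ [PySem.Int.bor (PySem.Int.bor (PySem.Int.bor (PySem.Int.bor ((0:Int) <<< (1:Nat)) a <<< (1:Nat)) b <<< (1:Nat)) c <<< (1:Nat)) d], 0, 0) rest := by
  simp [List.foldl, konwertuj_do_4_bitowych_alt_step]

theorem go_eq_alt : ∀ n (l : List Int), l.length = n → ∀ acc,
    konwertuj_do_4_bitowych_go l acc
      = (List.foldl konwertuj_do_4_bitowych_alt_step (acc, 0, 0) l).1 := by
  intro n
  induction n using Nat.strong_induction_on with
  | _ n ih =>
    intro l hl acc
    match l with
    | a :: b :: c :: d :: rest =>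
      rw [konwertuj_do_4_bitowych_go]
      have hlen : 4 ≤ (a :: b :: c :: d :: rest).length := by simp
      rw [dif_pos hlen, alt_foldl_four]
      have := ih rest.length (by simp at hl; omega) rest rfl
        (acc ++ [List.foldl (fun a bit => PySem.Int.bor (a <<< (1:Nat)) bit) (0:Int) ((a :: b :: c :: d :: rest).take 4)])
      simpa [List.take, List.foldl] using this
    | [] => rw [konwertuj_do_4_bitowych_go]; simp
    | [a] => rw [konwertuj_do_4_bitowych_go]
             simp [List.foldl, konwertuj_do_4_bitowych_alt_step]
    | [a, b] => rw [konwertuj_do_4_bitowych_go]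
                simp [List.foldl, konwertuj_do_4_bitowych_alt_step]
    | [a, b, c] => rw [konwertuj_do_4_bitowych_go]
                   simp [List.foldl, konwertuj_do_4_bitowych_alt_step]

-- ===== VERDICT (by name: the statement is the Claim_ definition above) =====
theorem konwertuj_do_4_bitowych_spec : Claim_equal_konwertuj_do_4_bitowych := by
  intro l _
  unfold Spec_konwertuj_do_4_bitowych konwertuj_do_4_bitowych konwertuj_do_4_bitowych_alt
  exact go_eq_alt l.length l rfl []
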